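-- pv_equiv track=rewrite | github.com/lantianit/python | Python基础课件资料/day08/02-代码/00-作业讲解.py | find_all_pos
-- ===== SOURCE A (Python) =====
-- def find_all_pos(num_list, sub_num):
--     # list1.index(1) 使用这种方法查找,得到的是从左至右第一次出现的下标位置
--     # 使用index查找,如果没找到则会报错,所以我们只循环指定元素出现的次数
--     # 创建起始位置
--     start_index = 0
--     # 创建一个空列表,用于储存每次查询到的索引
--     index_list = []
--     # 循环数字出现的次数,否则可能index会报错
--     for i in range(num_list.count(sub_num)):
--         # 查询索引
--         index = num_list.index(sub_num, start_index)
--         # 将索引放入index_list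
--         index_list.append(index)
--         # 更新下次查询的起始位置
--         start_index = index + 1
--     # 将索引以元组的形式返回
--     return tuple(index_list)
-- ===== SOURCE B (Python) =====
-- def find_all_pos(num_list, sub_num):
--     """Return a tuple of all indices where sub_num occurs in num_list."""
--     positions = []
--     for i, x in enumerate(num_list):
--         if x == sub_num:
--             positions.append(i)
--     return tuple(positions)
-- ===== Notes on version B (the rewrite author's own statement) =====
-- stated objective: simpler
-- what changed: Replaces the count-then-repeated-.index rescan loop (cursor plus count bookkeeping) by a single enumerate pass that appends the running index on each match.
import Mathlib
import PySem

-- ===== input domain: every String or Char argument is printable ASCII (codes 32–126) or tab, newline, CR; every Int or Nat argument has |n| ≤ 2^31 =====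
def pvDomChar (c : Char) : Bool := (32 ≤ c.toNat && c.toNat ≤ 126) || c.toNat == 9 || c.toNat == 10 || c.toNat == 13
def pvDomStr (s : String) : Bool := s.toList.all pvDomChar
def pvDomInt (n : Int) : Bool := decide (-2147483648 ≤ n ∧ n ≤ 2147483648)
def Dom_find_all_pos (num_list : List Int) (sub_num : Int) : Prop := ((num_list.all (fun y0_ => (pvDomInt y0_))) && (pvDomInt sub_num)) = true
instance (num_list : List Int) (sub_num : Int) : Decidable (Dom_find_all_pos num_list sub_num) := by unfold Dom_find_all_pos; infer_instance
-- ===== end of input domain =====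

-- B replaces A's count-then-repeated-.index rescans by a single enumerate pass (simpler, one pass).


-- ===== PORT A =====
-- one loop-body step: index = num_list.index(sub_num, start_index)  (start + search in the dropped suffix,
-- exact for the always-in-range nonnegative start A maintains); append; start_index = index + 1.
-- The 'none' branch is unreachable (A loops exactly count times), where Python .index would raise.
def find_all_pos_step (num_list : List Int) (sub_num : Int) (st : Int × List Int) (_i : Int) : Int × List Int :=
  match PySem.List.index? (num_list.drop st.1.toNat) sub_num with
  | some k => (st.1 + (k : Int) + 1, st.2 ++ [st.1 + (k : Int)])
  | none => st

def find_all_pos (num_list : List Int) (sub_num : Int) : List Int :=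
  ((PySem.List.pyRange 0 ((PySem.List.count num_list sub_num : Nat) : Int) 1).foldl
      (find_all_pos_step num_list sub_num) (0, [])).2

-- ===== PORT B =====
def find_all_pos_alt (num_list : List Int) (sub_num : Int) : List Int :=
  (PySem.List.enumerate num_list 0).foldl
    (fun acc p => if p.2 == sub_num then acc ++ [p.1] else acc) []

-- ===== PRECONDITION & SPEC =====
def Spec_find_all_pos (num_list : List Int) (sub_num : Int) (out : List Int) : Prop := out = find_all_pos_alt num_list sub_num
instance (num_list : List Int) (sub_num : Int) (out : List Int) : Decidable (Spec_find_all_pos num_list sub_num out) := by unfold Spec_find_all_pos; infer_instance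

-- ===== CLAIM (what is proved, stated in full; the proofs are below) =====
def Claim_equal_find_all_pos : Prop := ∀ (num_list : List Int) (sub_num : Int), Dom_find_all_pos num_list sub_num → Spec_find_all_pos num_list sub_num (find_all_pos num_list sub_num)

-- ===== LEMMAS AND PROOFS =====

-- A's loop body ignores the loop variable, so the fold only depends on the range's length.
def stepIter (num_list : List Int) (sub_num : Int) : Nat → Int × List Int → Int × List Int
  | 0, st => st
  | n + 1, st => stepIter num_list sub_num n (find_all_pos_step num_list sub_num st 0)

theorem stepIter_succ (num_list : List Int) (sub_num : Int) (n : Nat) (st : Int × List Int) :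
    stepIter num_list sub_num (n + 1) st =
      stepIter num_list sub_num n (find_all_pos_step num_list sub_num st 0) := rfl

theorem foldl_step_eq_stepIter (num_list : List Int) (sub_num : Int) (l : List Int) (st : Int × List Int) :
    l.foldl (find_all_pos_step num_list sub_num) st = stepIter num_list sub_num l.length st := by
  induction l generalizing st with
  | nil => rfl
  | cons x t ih =>
    rw [List.foldl_cons, ih, List.length_cons, stepIter_succ]
    rfl

theorem foldl_enum_no_match (sub_num : Int) (t : List Int) (hmem : sub_num ∉ t) :
    ∀ (b0 : Int) (acc : List Int),
      (PySem.List.enumerate t b0).foldl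
        (fun acc p => if p.2 == sub_num then acc ++ [p.1] else acc) acc = acc := by
  induction t with
  | nil => intro b0 acc; simp [PySem.List.enumerate_nil]
  | cons y u ih =>
    intro b0 acc
    have hy : y ≠ sub_num := fun h => hmem (h ▸ List.mem_cons_self)
    have hu : sub_num ∉ u := fun h => hmem (List.mem_cons_of_mem _ h)
    rw [PySem.List.enumerate_cons, List.foldl_cons]
    have hcond : ¬ (((b0, y).2 == sub_num) = true) := by simp [hy]
    rw [if_neg hcond]
    exact ih hu (b0 + 1) acc

-- Core invariant: iterating A's step (count l sub_num) times from start b, where l = L.drop b,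
-- appends exactly the matching indices of the suffix (as produced by B's enumerate pass).
theorem stepIter_spec (sub_num : Int) (l : List Int) : ∀ (L : List Int) (b : Nat) (acc : List Int),
    L.drop b = l →
    (stepIter L sub_num (l.count sub_num) ((b : Int), acc)).2 =
      (PySem.List.enumerate l (b : Int)).foldl
        (fun acc p => if p.2 == sub_num then acc ++ [p.1] else acc) acc := by
  induction l with
  | nil => intro L b acc h; simp [stepIter, PySem.List.enumerate_nil]
  | cons x t ih =>
    intro L b acc hdrop
    have hdt : L.drop (b + 1) = t := by
      rw [← List.tail_drop, hdrop]; rfl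
    rw [PySem.List.enumerate_cons, List.foldl_cons]
    by_cases hx : x = sub_num
    · subst hx
      rw [List.count_cons_self, stepIter_succ]
      have hstep : find_all_pos_step L x ((b : Int), acc) 0 = (((b + 1 : Nat) : Int), acc ++ [(b : Int)]) := by
        unfold find_all_pos_step
        rw [Int.toNat_natCast, hdrop, PySem.List.index?_cons_self]
        refine Prod.ext_iff.mpr ⟨by push_cast; ring, by simp⟩
      rw [hstep, ih L (b + 1) (acc ++ [(b : Int)]) hdt, Nat.cast_add, Nat.cast_one]
      simp
    · have hc : (x :: t).count sub_num = t.count sub_num := by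
        simp [hx]
      rw [hc]
      have heq : (if (x == sub_num) = true then acc ++ [(b : Int)] else acc) = acc := by
        simp [hx]
      rw [heq]
      cases hn : t.count sub_num with
      | zero =>
        have hmem : sub_num ∉ t := by
          intro hm; have := List.count_pos_iff.mpr hm; omega
        rw [foldl_enum_no_match sub_num t hmem]
        simp [stepIter]
      | succ m =>
        -- one more iteration to run; starting from b or from b+1 reaches the same state,
        -- because L[b] = x ≠ sub_num.
        have hmem : sub_num ∈ t := by
          have h0 : 0 < t.count sub_num := by omega
          exact List.count_pos_iff.mp h0
        obtain ⟨k, hk⟩ : ∃ k, PySem.List.index? t sub_num = some k := by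
          cases hidx : PySem.List.index? t sub_num with
          | none => exact absurd hmem ((PySem.List.index?_eq_none_iff t sub_num).mp hidx)
          | some k => exact ⟨k, rfl⟩
        have e : ((b : Int)) + ((k + 1 : Nat) : Int) = (((b + 1 : Nat) : Int)) + ((k : Nat) : Int) := by
          push_cast; ring
        have hstep1 : find_all_pos_step L sub_num ((b : Int), acc) 0 =
            find_all_pos_step L sub_num (((b + 1 : Nat) : Int), acc) 0 := by
          unfold find_all_pos_step
          rw [Int.toNat_natCast, Int.toNat_natCast, hdrop, hdt,
            PySem.List.index?_cons_of_ne t hx, hk]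
          simp only [Option.map_some]
          refine Prod.ext_iff.mpr ⟨by rw [e], by rw [e]⟩
        rw [stepIter_succ, hstep1, ← stepIter_succ, ← hn, ih L (b + 1) acc hdt,
          Nat.cast_add, Nat.cast_one]

-- ===== VERDICT (by name: the statement is the Claim_ definition above) =====
theorem find_all_pos_spec : Claim_equal_find_all_pos := by
  intro num_list sub_num _
  show find_all_pos num_list sub_num = find_all_pos_alt num_list sub_num
  unfold find_all_pos find_all_pos_alt
  rw [foldl_step_eq_stepIter]
  have hlen : (PySem.List.pyRange 0 ((PySem.List.count num_list sub_num : Nat) : Int) 1).length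
      = num_list.count sub_num := by
    simp [PySem.List.count_eq]
  rw [hlen]
  have h := stepIter_spec sub_num num_list num_list 0 [] (by simp)
  simpa using h
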